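-- pv_equiv track=rewrite | github.com/dexplo/jupyter_to_medium | jupyter_to_medium/_latex.py | replicate_alignment
-- ===== SOURCE A (Python) =====
-- def replicate_alignment(lt: list) -> list:
--
--     # new list with offset latex
--     offset_lt = []
--     found_first_equals = False
--     offset = 0
--
--     for line in lt:
--         if "&=" in line:
--             # check if this is the first
--             if not found_first_equals:
--                 # then this is the first so find offset
--                 # factor of 1.5 if just because spaces tend to be
--                 # thinner than text
--                 offset = int(line.find("&=") * 1.35 // 1)
--                 found_first_equals = True
--                 # replace with normal equals
--                 offset_lt.append(line.replace("&=", "="))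
--             else:
--                 # we just need to replace
--                 replacement = r"\ " * offset + "="
--                 offset_lt.append(line.replace("&=", replacement))
--         else:
--             # just add it on
--             offset_lt.append(line)
--     return offset_lt
-- ===== SOURCE B (Python) =====
-- def replicate_alignment(lt: list) -> list:
--     # split-and-concatenate: cut lt into the prefix before the first "&=" line,
--     # that line, and the suffix; transform the three segments independently.
--     k = 0
--     while k < len(lt) and "&=" not in lt[k]:
--         k += 1
--     if k == len(lt):
--         return lt[:]
--     first = lt[k]
--     offset = int(first.find("&=") * 1.35 // 1)
--     pad = "\\ " * offset + "="
--     # replace of an absent substring is the identity, so the suffix needs no test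
--     return lt[:k] + [first.replace("&=", "=")] + [l.replace("&=", pad) for l in lt[k + 1:]]
-- ===== Notes on version B (the rewrite author's own statement) =====
-- stated objective: alternative
-- what changed: A's single stateful loop (a first-seen flag and offset threaded through every line, branching per line) is replaced by a split-and-concatenate decomposition: B cuts the list into the untouched prefix, the first '&=' line, and the suffix, transforms the three segments independently, and rewrites the suffix with one unconditional replace (replace of an absent substring is the identity), so no per-line membership test or state remains.
import Mathlib
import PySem

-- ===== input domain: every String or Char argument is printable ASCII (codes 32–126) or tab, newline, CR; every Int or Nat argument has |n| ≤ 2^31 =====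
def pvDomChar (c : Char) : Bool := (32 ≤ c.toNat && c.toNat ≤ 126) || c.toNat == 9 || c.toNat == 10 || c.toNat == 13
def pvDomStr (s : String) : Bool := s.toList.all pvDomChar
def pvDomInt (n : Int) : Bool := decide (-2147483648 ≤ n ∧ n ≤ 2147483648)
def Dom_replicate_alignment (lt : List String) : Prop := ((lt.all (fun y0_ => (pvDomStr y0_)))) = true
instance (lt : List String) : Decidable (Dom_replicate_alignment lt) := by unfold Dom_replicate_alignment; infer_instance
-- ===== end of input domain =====

-- B replaces A's stateful flag-threaded loop by a split-and-concatenate decomposition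
-- (prefix / first "&=" line / unconditionally rewritten suffix); alternative, not faster.

-- shared helpers: both Pythons compute the very same offset and replacement string
-- int(k * 1.35 // 1): the double closest to 1.35 is 27/20 + 1/(5*2^51), so for find
-- indices 0 ≤ k ≤ 2^31 the float expression equals exactly floor(27*k/20) (exact on this domain)
def pvOffset (line : String) : Int := PySem.Int.floordiv (27 * PySem.Str.find line "&=") 20
-- r"\ " * offset + "="  (character-exact string repetition and concatenation)
def pvRep (offset : Int) : String := String.ofList (PySem.List.pyRepeat ['\\', ' '] offset ++ ['='])

-- ===== PORT A =====
-- A's for-loop over lt threading (found_first_equals, offset), appending line by line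
def raLoop (found : Bool) (offset : Int) : List String → List String
  | [] => []
  | line :: rest =>
    if PySem.Str.isIn "&=" line then
      if !found then
        PySem.Str.replace line "&=" "=" :: raLoop true (pvOffset line) rest
      else
        PySem.Str.replace line "&=" (pvRep offset) :: raLoop found offset rest
    else
      line :: raLoop found offset rest

def replicate_alignment (lt : List String) : List String := raLoop false 0 lt

-- ===== PORT B =====
-- the while-loop advancing k past the lines without "&="
def rbFindK : List String → Nat
  | [] => 0
  | line :: rest => if PySem.Str.isIn "&=" line then 0 else rbFindK rest + 1

-- split at k, keep the prefix, fix the first line, rewrite the suffix unconditionally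
def replicate_alignment_alt (lt : List String) : List String :=
  let k := rbFindK lt
  match lt.drop k with          -- empty iff k == len(lt), i.e. no "&=" line exists
  | [] => lt
  | first :: tail =>
    lt.take k ++ [PySem.Str.replace first "&=" "="]
      ++ tail.map (fun l => PySem.Str.replace l "&=" (pvRep (pvOffset first)))

-- ===== PRECONDITION & SPEC =====
def Spec_replicate_alignment (lt : List String) (out : List String) : Prop := out = replicate_alignment_alt lt
instance (lt : List String) (out : List String) : Decidable (Spec_replicate_alignment lt out) := by unfold Spec_replicate_alignment; infer_instance

-- ===== CLAIM (what is proved, stated in full; the proofs are below) =====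
def Claim_equal_replicate_alignment : Prop := ∀ (lt : List String), Dom_replicate_alignment lt → Spec_replicate_alignment lt (replicate_alignment lt)

-- ===== LEMMAS AND PROOFS =====

-- replace.go leaves the string unchanged when the pattern occurs nowhere
theorem replace_go_absent (old new : List Char) :
    ∀ (fuel : Nat) (l acc : List Char), ¬ old <:+: l →
      PySem.Chars.replace.go old new fuel l acc = acc.reverse ++ l := by
  intro fuel
  induction fuel with
  | zero => intro l acc _; rfl
  | succ fuel ih =>
    intro l acc h
    match l with
    | [] => simp [PySem.Chars.replace.go]
    | c :: t =>
      have hpre : old.isPrefixOf (c :: t) = false := by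
        rw [← Bool.not_eq_true, List.isPrefixOf_iff_prefix]
        exact fun hp => h hp.isInfix
      have ht : ¬ old <:+: t := fun hi => h (hi.trans (List.suffix_cons c t).isInfix)
      rw [PySem.Chars.replace.go]
      simp only [hpre, Bool.false_eq_true, if_false]
      rw [ih t (c :: acc) ht]
      simp

-- the Python-level consequence: replacing an absent substring is the identity
theorem replace_absent (l pad : String) (h : PySem.Str.isIn "&=" l = false) :
    PySem.Str.replace l "&=" pad = l := by
  have hinf : ¬ ('&' :: '=' :: []) <:+: l.toList := by
    have := PySem.Chars.isIn_eq_false_iff (sub := ['&', '=']) (s := l.toList)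
    simpa using this.mp (by simpa using h)
  rw [PySem.Str.replace, PySem.Chars.replace]
  rw [if_neg (by simp), replace_go_absent "&=".toList pad.toList l.toList.length l.toList [] (by simpa using hinf)]
  simp

-- once the first "&=" line is past, A maps the fixed replacement over the rest;
-- by replace_absent the membership test inside the map can be dropped
theorem raLoop_true (off : Int) (lt : List String) :
    raLoop true off lt = lt.map (fun l => PySem.Str.replace l "&=" (pvRep off)) := by
  induction lt with
  | nil => rfl
  | cons l rest ih =>
    by_cases hc : PySem.Str.isIn "&=" l = true
    · simp only [raLoop, hc, if_true]; simpa using ih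
    · have hcf : PySem.Str.isIn "&=" l = false := by simpa using hc
      simp only [raLoop, hcf, Bool.false_eq_true, if_false, List.map_cons,
        replace_absent l (pvRep off) hcf]
      simpa using ih

theorem main_eq (lt : List String) : raLoop false 0 lt = replicate_alignment_alt lt := by
  induction lt with
  | nil => rfl
  | cons l rest ih =>
    by_cases hc : PySem.Str.isIn "&=" l = true
    · -- the first "&=" line is the head: k = 0, the three segments are [], [l'], map tail
      have hc' : PySem.Chars.isIn ['&', '='] l.toList = true := by simpa using hc
      simp [replicate_alignment_alt, rbFindK, raLoop, hc', raLoop_true]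
    · -- head passes through: k = rbFindK rest + 1, drop/take peel off the head
      have hcf : PySem.Chars.isIn ['&', '='] l.toList = false := by simpa using hc
      have hr : raLoop false 0 (l :: rest) = l :: replicate_alignment_alt rest := by
        simp [raLoop, hcf, ih]
      rw [hr]
      unfold replicate_alignment_alt
      cases hdrop : rest.drop (rbFindK rest) with
      | nil => simp [rbFindK, hcf, hdrop]
      | cons first tail => simp [rbFindK, hcf, hdrop]

-- ===== VERDICT (by name: the statement is the Claim_ definition above) =====
theorem replicate_alignment_spec : Claim_equal_replicate_alignment := by
  intro lt _
  unfold Spec_replicate_alignment replicate_alignment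
  exact main_eq lt
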